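-- pv_equiv track=rewrite | github.com/lcantillo00/python-exercises | 10-List/ex11.py | sum_of_initial_odds
-- ===== SOURCE A (Python) =====
-- def sum_of_initial_odds(nums):
--     sum=0
--     for i in nums:
--         if i%2 !=0:
--             sum=sum+i
--         else:
--             break
--     return sum
-- ===== SOURCE B (Python) =====
-- def sum_of_initial_odds(nums):
--     idx = next((k for k, v in enumerate(nums) if v % 2 == 0), len(nums))
--     return sum(nums[:idx])
-- ===== Notes on version B (the rewrite author's own statement) =====
-- stated objective: idiomatic
-- what changed: Instead of accumulating inline with a break, B first finds the index of the first even element (defaulting to len(nums)) and then sums the prefix slice.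
import Mathlib
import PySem

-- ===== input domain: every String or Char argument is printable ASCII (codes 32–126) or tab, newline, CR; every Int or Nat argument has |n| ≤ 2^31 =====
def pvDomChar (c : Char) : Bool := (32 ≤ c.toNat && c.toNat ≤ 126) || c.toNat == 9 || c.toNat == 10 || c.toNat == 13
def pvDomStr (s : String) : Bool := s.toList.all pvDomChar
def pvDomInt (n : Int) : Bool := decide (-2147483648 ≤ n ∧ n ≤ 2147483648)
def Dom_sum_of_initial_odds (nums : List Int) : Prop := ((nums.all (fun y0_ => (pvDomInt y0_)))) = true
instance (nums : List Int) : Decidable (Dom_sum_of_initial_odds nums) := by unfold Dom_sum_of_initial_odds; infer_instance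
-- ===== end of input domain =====

-- ===== PORT A =====
-- loop with break, accumulator 'sum'
def pvGoA (nums : List Int) (s : Int) : Int :=
  match nums with
  | [] => s
  | i :: rest => if PySem.Int.mod i 2 ≠ 0 then pvGoA rest (s + i) else s

def sum_of_initial_odds (nums : List Int) : Int := pvGoA nums 0

-- ===== PORT B =====
-- B: find the index of the first even element (default len), then sum the prefix
def sum_of_initial_odds_alt (nums : List Int) : Int :=
  (nums.take (nums.findIdx (fun v => PySem.Int.mod v 2 == 0))).sum

-- ===== PRECONDITION & SPEC =====
def Spec_sum_of_initial_odds (nums : List Int) (out : Int) : Prop := out = sum_of_initial_odds_alt nums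
instance (nums : List Int) (out : Int) : Decidable (Spec_sum_of_initial_odds nums out) := by unfold Spec_sum_of_initial_odds; infer_instance

-- ===== CLAIM (what is proved, stated in full; the proofs are below) =====
def Claim_equal_sum_of_initial_odds : Prop := ∀ (nums : List Int), Dom_sum_of_initial_odds nums → Spec_sum_of_initial_odds nums (sum_of_initial_odds nums)

-- ===== LEMMAS AND PROOFS =====

lemma pvGoA_eq (nums : List Int) (s : Int) :
    pvGoA nums s = s + sum_of_initial_odds_alt nums := by
  induction nums generalizing s with
  | nil => simp [pvGoA, sum_of_initial_odds_alt]
  | cons i rest ih =>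
    rcases Int.emod_two_eq i with h | h
    · simp [pvGoA, sum_of_initial_odds_alt, List.findIdx_cons, h]
    · simp [pvGoA, sum_of_initial_odds_alt, List.findIdx_cons, h,
        List.take_succ_cons, ih]
      ring

-- ===== VERDICT (by name: the statement is the Claim_ definition above) =====
theorem sum_of_initial_odds_spec : Claim_equal_sum_of_initial_odds := by
  intro nums _
  show sum_of_initial_odds nums = sum_of_initial_odds_alt nums
  simpa using pvGoA_eq nums 0
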